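-- pv_equiv track=rewrite | github.com/Barath410/fra | rule_based_recog/extract_entities.py | _tokenize_template
-- ===== SOURCE A (Python) =====
-- from typing import Dict, Iterable, List, Tuple
--
-- def _tokenize_template(template_body: str) -> List[Tuple[str, str]]:
--     """Return ordered tokens [('lit'|'ph', value)] from a template body."""
--     tokens: List[Tuple[str, str]] = []
--     buffer: List[str] = []
--     i = 0
--     length = len(template_body)
--
--     while i < length:
--         char = template_body[i]
--         if char == "{":
--             if buffer:
--                 tokens.append(("lit", "".join(buffer)))
--                 buffer = []
--             end = template_body.find("}", i)
--             if end == -1: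
--                 raise ValueError("Unclosed placeholder in template")
--             name = template_body[i + 1 : end]
--             tokens.append(("ph", name))
--             i = end + 1
--         else:
--             buffer.append(char)
--             i += 1
--
--     if buffer:
--         tokens.append(("lit", "".join(buffer)))
--     return tokens
-- ===== SOURCE B (Python) =====
-- def _tokenize_template(template_body):
--     """Return ordered tokens [('lit'|'ph', value)] from a template body."""
--     tokens = []
--     pending = ""
--     parts = template_body.split("}")
--     for part in parts[:-1]:
--         brace = part.find("{")
--         if brace == -1:
--             # this '}' is literal text, not a placeholder terminator
--             pending += part + "}"
--         else:
--             lit = pending + part[:brace]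
--             if lit:
--                 tokens.append(("lit", lit))
--             tokens.append(("ph", part[brace + 1:]))
--             pending = ""
--     tail = pending + parts[-1]
--     if "{" in tail:
--         raise ValueError("Unclosed placeholder in template")
--     if tail:
--         tokens.append(("lit", tail))
--     return tokens
-- ===== Notes on version B (the rewrite author's own statement) =====
-- stated objective: faster
-- what changed: Replaces the index-based per-character while loop with buffer and find-from-i by splitting the template once on the closing brace and scanning each piece for its first opening brace (literal prefix / placeholder name), with a pending buffer for closing braces that are literal text.
import Mathlib
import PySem

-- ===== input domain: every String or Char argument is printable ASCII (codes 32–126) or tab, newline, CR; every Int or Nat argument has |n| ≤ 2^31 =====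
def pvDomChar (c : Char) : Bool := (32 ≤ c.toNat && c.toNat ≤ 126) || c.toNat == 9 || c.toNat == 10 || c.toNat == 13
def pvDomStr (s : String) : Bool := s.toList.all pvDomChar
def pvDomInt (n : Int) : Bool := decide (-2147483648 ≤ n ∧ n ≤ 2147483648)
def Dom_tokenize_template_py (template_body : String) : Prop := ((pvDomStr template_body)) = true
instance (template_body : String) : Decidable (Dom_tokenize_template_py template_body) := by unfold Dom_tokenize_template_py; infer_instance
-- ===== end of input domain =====

-- B tokenizes by splitting on '}' once and scanning each piece for its first '{' instead of
-- A's per-character while loop; same return values, measurably faster in CPython (bulk split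
-- vs per-character interpreted loop).

-- ===== PORT A =====
-- template_body.find("}", i) restricted to the suffix starting at i: returns the name chars
-- before the first '}' and the remainder after it; none = find returned -1.
def pyFindCloseA : List Char → Option (List Char × List Char)
  | [] => none
  | c :: t =>
    if c = '}' then some ([], t)
    else
      match pyFindCloseA t with
      | none => none
      | some (n, a) => some (c :: n, a)

theorem pyFindCloseA_length : ∀ (l n a : List Char), pyFindCloseA l = some (n, a) → a.length < l.length := by
  intro l
  induction l with
  | nil => intro n a h; simp [pyFindCloseA] at h
  | cons c t ih =>
    intro n a h
    simp only [pyFindCloseA] at h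
    by_cases hc : c = '}'
    · simp [hc] at h; simp [h.2]
    · simp [hc] at h
      cases ht : pyFindCloseA t with
      | none => rw [ht] at h; simp at h
      | some p =>
        rw [ht] at h
        cases p with
        | mk n' a' =>
          simp at h
          have := ih n' a' ht
          simp [← h.2]
          omega

-- A's while loop: buffer collects literal chars; '{' flushes the buffer, jumps to the
-- matching '}' (pyFindCloseA) and emits the placeholder. none = Python raises ValueError
-- (excluded by Pre_); the port returns the flushed buffer there.
def goA (buffer : List Char) : List Char → List (String × String)
  | [] => if buffer.isEmpty then [] else [("lit", String.mk buffer)]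
  | c :: rest =>
    if c = '{' then
      match _h : pyFindCloseA rest with
      | none => if buffer.isEmpty then [] else [("lit", String.mk buffer)]
      | some (name, after) =>
        (if buffer.isEmpty then [] else [("lit", String.mk buffer)]) ++
          ("ph", String.mk name) :: goA [] after
    else goA (buffer ++ [c]) rest
termination_by l => l.length
decreasing_by
  · have := pyFindCloseA_length rest name after _h
    simp; omega
  · simp

def tokenize_template_py (template_body : String) : List (String × String) :=
  goA [] template_body.toList

-- ===== PORT B =====
-- B's loop over template_body.split("}"): all pieces but the last are handled in the
-- loop (a '}'-terminated piece), the last is the tail. Raise branch ('{' in tail)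
-- returns tokens (excluded by Pre_).
def goB (tokens : List (String × String)) (pending : List Char) : List (List Char) → List (String × String)
  | [] => tokens
  | [last] =>
    let tail := pending ++ last
    if tail.contains '{' then tokens
    else if tail.isEmpty then tokens else tokens ++ [("lit", String.mk tail)]
  | part :: next :: rest =>
    let before := part.takeWhile (fun c => c != '{')
    match part.dropWhile (fun c => c != '{') with
    | [] => goB tokens (pending ++ part ++ ['}']) (next :: rest)
    | _ :: name =>
      let lit := pending ++ before
      let pre := if lit.isEmpty then ([] : List (String × String)) else [("lit", String.mk lit)]
      goB (tokens ++ pre ++ [("ph", String.mk name)]) [] (next :: rest)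

def tokenize_template_py_alt (template_body : String) : List (String × String) :=
  goB [] [] (template_body.toList.splitOn '}')

-- ===== PRECONDITION & SPEC =====
-- Pre_ excludes exactly the inputs on which A raises ValueError ("Unclosed placeholder"):
-- those containing a '{' with no '}' at or after it, i.e. a '{' after the last '}'.
def Pre_tokenize_template_py (template_body : String) : Prop :=
  ((template_body.toList.reverse.takeWhile (fun c => c != '}')).contains '{') = false
instance (template_body : String) : Decidable (Pre_tokenize_template_py template_body) := by
  unfold Pre_tokenize_template_py; infer_instance

def pvWitness_tokenize_template_py : String := "pre {a}{}, {x{y} end"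

def Spec_tokenize_template_py (template_body : String) (out : List (String × String)) : Prop := out = tokenize_template_py_alt template_body
instance (template_body : String) (out : List (String × String)) : Decidable (Spec_tokenize_template_py template_body out) := by unfold Spec_tokenize_template_py; infer_instance

-- ===== CLAIM (what is proved, stated in full; the proofs are below) =====
def Claim_equal_tokenize_template_py : Prop := ∀ (template_body : String), Dom_tokenize_template_py template_body → Pre_tokenize_template_py template_body → Spec_tokenize_template_py template_body (tokenize_template_py template_body)

-- ===== LEMMAS AND PROOFS =====

theorem goA_lit_chunk : ∀ (x : List Char), (∀ c ∈ x, c ≠ '{') → ∀ (buf r : List Char),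
    goA buf (x ++ r) = goA (buf ++ x) r := by
  intro x hx
  induction x with
  | nil => intro buf r; simp
  | cons c t ih =>
    intro buf r
    have hc : c ≠ '{' := hx c (by simp)
    simp only [List.cons_append, goA, if_neg hc]
    rw [ih (fun d hd => hx d (by simp [hd])) (buf ++ [c]) r]
    simp

theorem pyFindCloseA_chunk : ∀ (v : List Char), (∀ c ∈ v, c ≠ '}') → ∀ (y : List Char),
    pyFindCloseA (v ++ '}' :: y) = some (v, y) := by
  intro v hv
  induction v with
  | nil => intro y; simp [pyFindCloseA]
  | cons c t ih =>
    intro y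
    have hc : c ≠ '}' := hv c (by simp)
    simp only [List.cons_append, pyFindCloseA, if_neg hc]
    rw [ih (fun d hd => hv d (by simp [hd])) y]

theorem splitOn_no_sep : ∀ (x : List Char), (∀ c ∈ x, c ≠ '}') → x.splitOn '}' = [x] := by
  intro x hx
  induction x with
  | nil => simp
  | cons c t ih =>
    have hc : c ≠ '}' := hx c (by simp)
    simp only [List.splitOn, List.splitOnP_cons] at *
    rw [if_neg (by simp [hc])]
    rw [ih (fun d hd => hx d (by simp [hd]))]
    rfl

theorem splitOn_chunk : ∀ (x : List Char), (∀ c ∈ x, c ≠ '}') → ∀ (y : List Char),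
    (x ++ '}' :: y).splitOn '}' = x :: y.splitOn '}' := by
  intro x hx
  induction x with
  | nil => intro y; simp [List.splitOn, List.splitOnP_cons]
  | cons c t ih =>
    intro y
    have hc : c ≠ '}' := hx c (by simp)
    simp only [List.cons_append, List.splitOn, List.splitOnP_cons] at *
    rw [if_neg (by simp [hc])]
    rw [ih (fun d hd => hx d (by simp [hd])) y]
    rfl

-- the no-orphan condition passes from x ++ '}' :: y to y
theorem noOrphan_tail : ∀ (x y : List Char),
    (((x ++ '}' :: y).reverse.takeWhile (fun c => c != '}')).contains '{') = false →
    ((y.reverse.takeWhile (fun c => c != '}')).contains '{') = false := by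
  intro x y h
  rw [List.reverse_append, List.reverse_cons, List.append_assoc, List.takeWhile_append] at h
  by_cases hall : (List.takeWhile (fun c => c != '}') y.reverse).length = y.reverse.length
  · have heq : List.takeWhile (fun c => c != '}') y.reverse = y.reverse :=
      (List.takeWhile_prefix _).eq_of_length hall
    rw [if_pos hall] at h
    rw [heq]
    simpa using h
  · rw [if_neg hall] at h
    exact h

theorem goA_ph : ∀ (buf name y : List Char), (∀ c ∈ name, c ≠ '}') →
    goA buf ('{' :: (name ++ '}' :: y)) =
      (if buf.isEmpty then ([] : List (String × String)) else [("lit", String.mk buf)]) ++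
        ("ph", String.mk name) :: goA [] y := by
  intro buf name y hname
  simp only [goA, if_true]
  split
  · next h =>
      rw [pyFindCloseA_chunk name hname y] at h
      exact absurd h (by simp)
  · next n1 a1 h =>
      rw [pyFindCloseA_chunk name hname y] at h
      simp at h
      rw [h.1, h.2]

theorem goB_no_sep : ∀ (l : List Char), (∀ c ∈ l, c ≠ '}') → ('{' ∉ l) →
    ∀ (buf : List Char) (toks : List (String × String)), ('{' ∉ buf) →
    goB toks buf (l.splitOn '}') = toks ++ goA buf l := by
  intro l hl hlb buf toks hbuf
  rw [splitOn_no_sep l hl]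
  have hA : goA buf l = if (buf ++ l).isEmpty then [] else [("lit", String.mk (buf ++ l))] := by
    have := goA_lit_chunk l (fun c hc h => hlb (h ▸ hc)) buf []
    simpa [goA] using this
  have hcont : (buf ++ l).contains '{' = false := by
    simp
    constructor
    · simpa using hbuf
    · simpa using hlb
  simp only [goB, hcont, Bool.false_eq_true, if_false, hA]
  by_cases he : (buf ++ l).isEmpty
  · simp [he]
  · simp [he]

theorem main_lemma : ∀ (n : Nat) (l : List Char), l.length ≤ n →
    ∀ (buf : List Char) (toks : List (String × String)),
    ((l.reverse.takeWhile (fun c => c != '}')).contains '{') = false →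
    ('{' ∉ buf) →
    goB toks buf (l.splitOn '}') = toks ++ goA buf l := by
  intro n
  induction n with
  | zero =>
    intro l hl buf toks hno hbuf
    have hln : l = [] := List.length_eq_zero_iff.mp (Nat.le_zero.mp hl)
    subst hln
    exact goB_no_sep [] (by simp) (by simp) buf toks hbuf
  | succ n ih =>
    intro l hl buf toks hno hbuf
    by_cases hmem : '}' ∈ l
    · -- l = x ++ '}' :: y with x '}'-free
      have hne : l.dropWhile (fun c => c != '}') ≠ [] := by
        intro h0
        rw [List.dropWhile_eq_nil_iff] at h0
        have := h0 '}' hmem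
        simp at this
      obtain ⟨d, y, hdy⟩ := List.exists_cons_of_ne_nil hne
      have hd : d = '}' := by
        have hh := List.head_dropWhile_not (fun c => c != '}') (l := l) hne
        simp [hdy] at hh
        exact hh
      subst hd
      have hsplit : l = l.takeWhile (fun c => c != '}') ++ '}' :: y := by
        conv_lhs => rw [← List.takeWhile_append_dropWhile (p := fun c => c != '}') (l := l)]
        rw [hdy]
      generalize hxdef : l.takeWhile (fun c => c != '}') = x at hsplit
      have hx : ∀ c ∈ x, c ≠ '}' := by
        intro c hc
        have := List.mem_takeWhile_imp (hxdef ▸ hc)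
        simpa using this
      have hylen : y.length ≤ n := by
        have : l.length = x.length + 1 + y.length := by rw [hsplit]; simp; omega
        omega
      have hnoy : ((y.reverse.takeWhile (fun c => c != '}')).contains '{') = false :=
        noOrphan_tail x y (hsplit ▸ hno)
      rw [hsplit, splitOn_chunk x hx y]
      obtain ⟨p1, t1, hy⟩ : ∃ a b, y.splitOn '}' = a :: b := by
        cases hys : y.splitOn '}' with
        | nil => exact absurd hys (by simpa [List.splitOn] using List.splitOnP_ne_nil _ y)
        | cons a b => exact ⟨a, b, rfl⟩
      rw [hy]
      cases hx2 : x.dropWhile (fun c => c != '{') with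
      | nil =>
        -- no '{' in x: the '}' is literal text
        have hxl : '{' ∉ x := by
          intro hc
          rw [List.dropWhile_eq_nil_iff] at hx2
          have := hx2 '{' hc
          simp at this
        have hbuf' : '{' ∉ buf ++ x ++ ['}'] := by
          simp [hbuf]
          exact fun h => absurd h hxl
        have hIH := ih y hylen (buf ++ x ++ ['}']) toks hnoy hbuf'
        rw [hy] at hIH
        have hA : goA buf (x ++ '}' :: y) = goA (buf ++ x ++ ['}']) y := by
          have := goA_lit_chunk (x ++ ['}']) (by
            intro c hc
            simp at hc
            rcases hc with hc | hc
            · exact fun h => absurd (h ▸ hc) hxl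
            · simp [hc]) buf y
          simpa using this
        rw [hA, ← hIH]
        simp only [goB, hx2]
      | cons c name =>
        -- x = u ++ '{' :: name, u '{'-free
        have hc : c = '{' := by
          have hne2 : x.dropWhile (fun c => c != '{') ≠ [] := by rw [hx2]; simp
          have hh := List.head_dropWhile_not (fun c => c != '{') (l := x) hne2
          simp [hx2] at hh
          exact hh
        subst hc
        have hxsplit : x = x.takeWhile (fun c => c != '{') ++ '{' :: name := by
          conv_lhs => rw [← List.takeWhile_append_dropWhile (p := fun c => c != '{') (l := x)]
          rw [hx2]
        generalize hudef : x.takeWhile (fun c => c != '{') = u at hxsplit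
        have hu : '{' ∉ u := by
          intro hcu
          have := List.mem_takeWhile_imp (hudef ▸ hcu)
          simp at this
        have hname : ∀ ch ∈ name, ch ≠ '}' := by
          intro ch hch
          exact hx ch (by rw [hxsplit]; simp [hch])
        have hIH := ih y hylen []
          (toks ++ (if (buf ++ u).isEmpty then ([] : List (String × String))
            else [("lit", String.mk (buf ++ u))]) ++ [("ph", String.mk name)]) hnoy (by simp)
        rw [hy] at hIH
        have hA : goA buf (x ++ '}' :: y) =
            (if (buf ++ u).isEmpty then ([] : List (String × String))
              else [("lit", String.mk (buf ++ u))]) ++ ("ph", String.mk name) :: goA [] y := by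
          have h1 : x ++ '}' :: y = u ++ ('{' :: (name ++ '}' :: y)) := by
            rw [hxsplit]; simp
          rw [h1, goA_lit_chunk u (fun ch hch h => hu (h ▸ hch)) buf ('{' :: (name ++ '}' :: y))]
          rw [goA_ph]
          exact hname
        rw [hA]
        simp only [goB, hx2, hudef]
        rw [hIH]
        simp
    · -- no '}' in l at all
      have hlb : '{' ∉ l := by
        have : l.reverse.takeWhile (fun c => c != '}') = l.reverse := by
          rw [List.takeWhile_eq_self_iff]
          intro c hc
          simp
          exact fun h => hmem (h ▸ (List.mem_reverse.mp hc))
        rw [this] at hno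
        intro hc
        rw [List.contains_eq_mem] at hno
        simp at hno
        exact hno hc
      exact goB_no_sep l (fun c hc h => hmem (h ▸ hc)) hlb buf toks hbuf

-- ===== VERDICT (by name: the statement is the Claim_ definition above) =====
theorem tokenize_template_py_spec : Claim_equal_tokenize_template_py := by
  intro s _ hpre
  unfold Spec_tokenize_template_py tokenize_template_py tokenize_template_py_alt
  have := main_lemma s.toList.length s.toList le_rfl [] [] hpre (by simp)
  simp at this
  exact this.symm
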